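-- pv_equiv track=rewrite | github.com/Crabtain959/new_concept_detection | main.py | get_nearby_coords_single
-- ===== SOURCE A (Python) =====
-- def get_nearby_coords_single(coord, n):
--     if n == 0:
--         return [coord]
--
--     if len(coord) == 2:
--         nearby_keys = [
--             (coord[0] + dx, coord[1] + dy)
--             for dx in range(-n, n+1)
--             for dy in range(-n, n+1)
--         ]
--     elif len(coord) == 3:
--         nearby_keys = [
--             (coord[0] + dx, coord[1] + dy, coord[2] + dz)
--             for dx in range(-n, n+1)
--             for dy in range(-n, n+1)
--             for dz in range(-n, n+1)
--         ]
--     else: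
--         raise Exception(f'Dimension should be either 2 or 3, got dimension {len(coord)}')
--     return [
--         x for x in nearby_keys
--         if all(0 < component < 400 for component in x)
--     ]
-- ===== SOURCE B (Python) =====
-- def get_nearby_coords_single(coord, n):
--     if n == 0:
--         return [coord]
--     out = [()]
--     for c in coord:
--         lo = max(-n, 1 - c)
--         hi = min(n, 399 - c)
--         out = [p + (c + d,) for p in out for d in range(lo, hi + 1)]
--     return out
-- ===== Notes on version B (the rewrite author's own statement) =====
-- stated objective: alternative
-- what changed: B intersects the delta interval with the bounds per axis and builds the cross product of the per-axis valid ranges directly (generalized over the dimension), instead of enumerating the whole (2n+1)^d box and filtering; no separate filtering pass and no per-dimension code duplication.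
import Mathlib
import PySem

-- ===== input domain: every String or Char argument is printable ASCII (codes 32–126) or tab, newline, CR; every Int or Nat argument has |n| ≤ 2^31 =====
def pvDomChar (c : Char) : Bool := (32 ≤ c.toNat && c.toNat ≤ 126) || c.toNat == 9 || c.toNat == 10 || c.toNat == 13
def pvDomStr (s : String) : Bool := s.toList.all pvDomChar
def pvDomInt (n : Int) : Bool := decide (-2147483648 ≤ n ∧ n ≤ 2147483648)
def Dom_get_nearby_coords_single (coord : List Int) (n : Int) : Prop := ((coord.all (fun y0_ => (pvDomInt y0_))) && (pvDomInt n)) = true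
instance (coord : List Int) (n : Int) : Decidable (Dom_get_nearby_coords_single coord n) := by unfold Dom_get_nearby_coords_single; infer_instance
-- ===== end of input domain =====

-- B builds the cross product of per-axis valid delta ranges (interval intersection)
-- instead of enumerating the whole (2n+1)^d box and filtering; dimension-generic.

-- ===== PORT A =====
def get_nearby_coords_single (coord : List Int) (n : Int) : List (List Int) :=
  if n = 0 then [coord]
  else if coord.length = 2 then
    let c0 := PySem.List.pyGetD coord 0 0
    let c1 := PySem.List.pyGetD coord 1 0
    let nearby_keys := (PySem.List.pyRange (-n) (n+1) 1).flatMap (fun dx =>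
      (PySem.List.pyRange (-n) (n+1) 1).map (fun dy => [c0 + dx, c1 + dy]))
    nearby_keys.filter (fun x => x.all (fun comp => decide (0 < comp) && decide (comp < 400)))
  else if coord.length = 3 then
    let c0 := PySem.List.pyGetD coord 0 0
    let c1 := PySem.List.pyGetD coord 1 0
    let c2 := PySem.List.pyGetD coord 2 0
    let nearby_keys := (PySem.List.pyRange (-n) (n+1) 1).flatMap (fun dx =>
      (PySem.List.pyRange (-n) (n+1) 1).flatMap (fun dy =>
        (PySem.List.pyRange (-n) (n+1) 1).map (fun dz => [c0 + dx, c1 + dy, c2 + dz])))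
    nearby_keys.filter (fun x => x.all (fun comp => decide (0 < comp) && decide (comp < 400)))
  else []  -- Python raises Exception here; excluded by Pre_

-- ===== PORT B =====
def get_nearby_coords_single_alt (coord : List Int) (n : Int) : List (List Int) :=
  if n = 0 then [coord]
  else coord.foldl (fun out c =>
    out.flatMap (fun p =>
      (PySem.List.pyRange (max (-n) (1 - c)) (min n (399 - c) + 1) 1).map (fun d => p ++ [c + d]))) [[]]

-- ===== PRECONDITION & SPEC =====
-- Pre_ excludes exactly the inputs where A raises (dimension not 2 or 3, with n ≠ 0).
def Pre_get_nearby_coords_single (coord : List Int) (n : Int) : Prop :=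
  n = 0 ∨ coord.length = 2 ∨ coord.length = 3
instance (coord : List Int) (n : Int) : Decidable (Pre_get_nearby_coords_single coord n) := by
  unfold Pre_get_nearby_coords_single; infer_instance

def pvWitness_get_nearby_coords_single : List Int × Int := ([5, 5], 1)

def Spec_get_nearby_coords_single (coord : List Int) (n : Int) (out : List (List Int)) : Prop := out = get_nearby_coords_single_alt coord n
instance (coord : List Int) (n : Int) (out : List (List Int)) : Decidable (Spec_get_nearby_coords_single coord n out) := by unfold Spec_get_nearby_coords_single; infer_instance

-- ===== CLAIM (what is proved, stated in full; the proofs are below) =====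
def Claim_equal_get_nearby_coords_single : Prop := ∀ (coord : List Int) (n : Int), Dom_get_nearby_coords_single coord n → Pre_get_nearby_coords_single coord n → Spec_get_nearby_coords_single coord n (get_nearby_coords_single coord n)


-- ===== LEMMAS AND PROOFS =====

-- filtering a step-1 range by an interval is the range over the intersected interval
lemma filter_range_eq (a b lo hi : Int) :
    (PySem.List.pyRange a b 1).filter (fun d => decide (lo ≤ d) && decide (d ≤ hi))
      = PySem.List.pyRange (max a lo) (min (b - 1) hi + 1) 1 := by
  apply List.Perm.eq_of_pairwise (le := (· < ·))
  · intro x y _ _ h1 h2; omega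
  · exact (PySem.List.pairwise_lt_pyRange_one a b).filter _
  · exact PySem.List.pairwise_lt_pyRange_one _ _
  · rw [List.perm_ext_iff_of_nodup ((PySem.List.nodup_pyRange_one a b).filter _)
      (PySem.List.nodup_pyRange_one _ _)]
    intro x
    simp only [List.mem_filter, PySem.List.mem_pyRange_one, Bool.and_eq_true, decide_eq_true_eq]
    omega

-- the A-side per-axis filter equals B's per-axis range
lemma axis_filter (n c : Int) :
    (PySem.List.pyRange (-n) (n+1) 1).filter (fun d => decide (0 < c + d) && decide (c + d < 400))
      = PySem.List.pyRange (max (-n) (1 - c)) (min n (399 - c) + 1) 1 := by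
  have h := filter_range_eq (-n) (n+1) (1 - c) (399 - c)
  have h1 : n + 1 - 1 = n := by ring
  rw [h1] at h
  rw [← h]
  apply List.filter_congr
  intro d _
  rw [show (decide (0 < c + d)) = decide (1 - c ≤ d) from by rw [decide_eq_decide]; omega,
      show (decide (c + d < 400)) = decide (d ≤ 399 - c) from by rw [decide_eq_decide]; omega]

lemma flatMap_ite_nil {α β : Type} (l : List α) (q : α → Bool) (F : α → List β) :
    (l.flatMap fun a => if q a then F a else []) = (l.filter q).flatMap F := by
  induction l with
  | nil => rfl
  | cons x xs ih =>
    simp only [List.flatMap_cons, List.filter_cons, ih]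
    by_cases hx : q x <;> simp [hx]

lemma prodFilter2 {β : Type} (R0 R1 : List Int) (P : β → Bool) (q0 q1 : Int → Bool)
    (m : Int → Int → β) (h : ∀ x y, P (m x y) = (q0 x && q1 y)) :
    (R0.flatMap fun x => R1.map fun y => m x y).filter P
      = (R0.filter q0).flatMap fun x => (R1.filter q1).map fun y => m x y := by
  have step : ∀ x, (R1.map fun y => m x y).filter P
      = if q0 x then (R1.filter q1).map (fun y => m x y) else [] := by
    intro x
    rw [List.filter_map]
    by_cases hx : q0 x
    · rw [if_pos hx]
      congr 1
      apply List.filter_congr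
      intro y _
      simp [Function.comp, h, hx]
    · rw [if_neg hx]
      have : R1.filter ((P ∘ fun y => m x y)) = [] := by
        apply List.filter_eq_nil_iff.mpr
        intro y _
        simp [Function.comp, h, hx]
      rw [this, List.map_nil]
  calc (R0.flatMap fun x => R1.map fun y => m x y).filter P
      = R0.flatMap (fun x => (R1.map fun y => m x y).filter P) := by
        rw [List.filter_flatMap]
    _ = R0.flatMap (fun x => if q0 x then (R1.filter q1).map (fun y => m x y) else []) := by
        apply List.flatMap_congr; intro x _; exact step x
    _ = (R0.filter q0).flatMap fun x => (R1.filter q1).map fun y => m x y :=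
        flatMap_ite_nil R0 q0 _

lemma prodFilter3 {β : Type} (R0 R1 R2 : List Int) (P : β → Bool) (q0 q1 q2 : Int → Bool)
    (m : Int → Int → Int → β) (h : ∀ x y z, P (m x y z) = (q0 x && q1 y && q2 z)) :
    (R0.flatMap fun x => R1.flatMap fun y => R2.map fun z => m x y z).filter P
      = (R0.filter q0).flatMap fun x =>
          (R1.filter q1).flatMap fun y => (R2.filter q2).map fun z => m x y z := by
  have step : ∀ x, (R1.flatMap fun y => R2.map fun z => m x y z).filter P
      = if q0 x then (R1.filter q1).flatMap fun y => (R2.filter q2).map fun z => m x y z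
        else [] := by
    intro x
    by_cases hx : q0 x
    · rw [if_pos hx]
      exact prodFilter2 R1 R2 P q1 q2 (fun y z => m x y z)
        (fun y z => by rw [h x y z, hx, Bool.true_and])
    · rw [if_neg (by simp [hx])]
      apply List.filter_eq_nil_iff.mpr
      intro v hv
      simp only [List.mem_flatMap, List.mem_map] at hv
      obtain ⟨y, _, z, _, rfl⟩ := hv
      simp [h, hx]
  calc (R0.flatMap fun x => R1.flatMap fun y => R2.map fun z => m x y z).filter P
      = R0.flatMap (fun x => (R1.flatMap fun y => R2.map fun z => m x y z).filter P) := by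
        rw [List.filter_flatMap]
    _ = R0.flatMap (fun x => if q0 x then
          (R1.filter q1).flatMap fun y => (R2.filter q2).map fun z => m x y z else []) := by
        apply List.flatMap_congr; intro x _; exact step x
    _ = _ := flatMap_ite_nil R0 q0 _

theorem get_nearby_coords_single_spec : Claim_equal_get_nearby_coords_single := by
  intro coord n _ hpre
  unfold Spec_get_nearby_coords_single
  by_cases h0 : n = 0
  · simp [get_nearby_coords_single, get_nearby_coords_single_alt, h0]
  · rcases hpre with h | h2 | h3
    · exact absurd h h0
    · -- dimension 2
      obtain ⟨c0, c1, rfl⟩ : ∃ c0 c1, coord = [c0, c1] := by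
        match coord, h2 with
        | [c0, c1], _ => exact ⟨c0, c1, rfl⟩
      simp only [get_nearby_coords_single, get_nearby_coords_single_alt, if_neg h0,
        List.length_cons, List.length_nil, List.foldl_cons, List.foldl_nil]
      rw [prodFilter2 _ _ _ (fun dx => decide (0 < c0 + dx) && decide (c0 + dx < 400))
        (fun dy => decide (0 < c1 + dy) && decide (c1 + dy < 400)) _
        (fun x y => by simp [PySem.List.pyGetD, PySem.List.pyGet?, PySem.List.pyIdx?, List.all_cons, Bool.and_assoc])]
      rw [axis_filter, axis_filter]
      simp [PySem.List.pyGetD, PySem.List.pyGet?, PySem.List.pyIdx?, List.flatMap_map]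
    · -- dimension 3
      obtain ⟨c0, c1, c2, rfl⟩ : ∃ c0 c1 c2, coord = [c0, c1, c2] := by
        match coord, h3 with
        | [c0, c1, c2], _ => exact ⟨c0, c1, c2, rfl⟩
      simp only [get_nearby_coords_single, get_nearby_coords_single_alt, if_neg h0,
        List.length_cons, List.length_nil, List.foldl_cons, List.foldl_nil]
      norm_num
      rw [prodFilter3 _ _ _ _ (fun dx => decide (0 < c0 + dx) && decide (c0 + dx < 400))
        (fun dy => decide (0 < c1 + dy) && decide (c1 + dy < 400))
        (fun dz => decide (0 < c2 + dz) && decide (c2 + dz < 400)) _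
        (fun x y z => by simp [PySem.List.pyGetD, PySem.List.pyGet?, PySem.List.pyIdx?, List.all_cons, Bool.and_assoc])]
      rw [axis_filter, axis_filter, axis_filter]
      simp [PySem.List.pyGetD, PySem.List.pyGet?, PySem.List.pyIdx?, List.flatMap_map, List.flatMap_assoc]
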